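-- pv_equiv track=rewrite | github.com/dinnerboneA/Chrome-Scrapper-Extension-for-LinkedIn-and-Indeed- | laravel scrapper/html-processor-api/scripts/person_scraper.py | get_highest_education_level
-- ===== SOURCE A (Python) =====
-- def get_highest_education_level(education_list):
--     """
--     Analyzes a list of education entries and returns the slug for the highest level.
--     e.g., 'bachelor', 'master', 'phd'
--     """
--     if not education_list:
--         return "Not available"
--
--     # Define the hierarchy and keywords for each level.
--     # The key is the value your <SelectItem> expects in React.
--     hierarchy = {
--         'phd': {'rank': 5, 'keywords': ['phd', 'doctorate', 'd.phil']},
--         'master': {'rank': 4, 'keywords': ['master', 'm.sc', 'm.a.', 'mba', 'meng']},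
--         'bachelor': {'rank': 3, 'keywords': ["bachelor", "b.sc", "b.a.", "beng", "llb", "bachelor of science"]},
--         'associate': {'rank': 2, 'keywords': ['associate', 'diploma']},
--         'high_school': {'rank': 1, 'keywords': ['high school', 'a-level', 'foundation']}
--     }
--
--     highest_rank = 0
--     highest_level_slug = "Not available"
--
--     for edu_item in education_list:
--         degree_text = edu_item.get('degree', '').lower()
--         if not degree_text:
--             continue
--
--         for slug, data in hierarchy.items():
--             if any(keyword in degree_text for keyword in data['keywords']):
--                 if data['rank'] > highest_rank:
--                     highest_rank = data['rank']
--                     highest_level_slug = slug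
--
--     return highest_level_slug
-- ===== SOURCE B (Python) =====
-- def get_highest_education_level(education_list):
--     levels = [
--         ('phd', ['phd', 'doctorate', 'd.phil']),
--         ('master', ['master', 'm.sc', 'm.a.', 'mba', 'meng']),
--         ('bachelor', ["bachelor", "b.sc", "b.a.", "beng", "llb", "bachelor of science"]),
--         ('associate', ['associate', 'diploma']),
--         ('high_school', ['high school', 'a-level', 'foundation']),
--     ]
--     for slug, keywords in levels:
--         for edu_item in education_list:
--             text = edu_item.get('degree', '').lower()
--             if text and any(kw in text for kw in keywords):
--                 return slug
--     return "Not available"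
-- ===== Notes on version B (the rewrite author's own statement) =====
-- stated objective: simpler
-- what changed: Replaced the items-outer loop with a running-max rank accumulator over a rank dict by a levels-outer scan in fixed descending-rank order that early-returns the first level whose keywords occur in any item's degree text.
import Mathlib
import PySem

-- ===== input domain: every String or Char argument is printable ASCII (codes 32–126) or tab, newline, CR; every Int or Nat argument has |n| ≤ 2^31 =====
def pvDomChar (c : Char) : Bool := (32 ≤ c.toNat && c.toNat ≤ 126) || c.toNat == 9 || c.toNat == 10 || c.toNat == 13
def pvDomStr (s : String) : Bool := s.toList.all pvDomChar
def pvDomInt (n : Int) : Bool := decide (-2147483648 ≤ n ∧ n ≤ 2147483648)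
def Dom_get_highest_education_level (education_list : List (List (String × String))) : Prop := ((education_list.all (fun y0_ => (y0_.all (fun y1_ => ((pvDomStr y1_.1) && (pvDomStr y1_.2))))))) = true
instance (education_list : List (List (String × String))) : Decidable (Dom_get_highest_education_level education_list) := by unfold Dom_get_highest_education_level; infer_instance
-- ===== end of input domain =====

-- B changes the loop structure only (levels-outer, early return on the first, i.e. highest,
-- matching level) — same return value, objective: simpler.

-- dict.get(k, dflt) on an association list: first match (shared Python-primitive helper)
def pyDictGetD (d : List (String × String)) (k dflt : String) : String :=
  match d with
  | [] => dflt
  | (k', v) :: rest => if k' = k then v else pyDictGetD rest k dflt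

-- ===== PORT A =====
-- the hierarchy dict, in its (insertion) iteration order: slug, rank, keywords
def pvHierA : List (String × Int × List String) :=
  [ ("phd", 5, ["phd", "doctorate", "d.phil"]),
    ("master", 4, ["master", "m.sc", "m.a.", "mba", "meng"]),
    ("bachelor", 3, ["bachelor", "b.sc", "b.a.", "beng", "llb", "bachelor of science"]),
    ("associate", 2, ["associate", "diploma"]),
    ("high_school", 1, ["high school", "a-level", "foundation"]) ]

-- body of 'for edu_item in education_list', state = (highest_rank, highest_level_slug)
def pvStepA (st : Int × String) (edu_item : List (String × String)) : Int × String :=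
  let degree_text := PySem.Str.lower (pyDictGetD edu_item "degree" "")
  if degree_text = "" then st
  else
    pvHierA.foldl
      (fun st2 p =>
        if p.2.2.any (fun kw => PySem.Str.isIn kw degree_text) then
          (if p.2.1 > st2.1 then (p.2.1, p.1) else st2)
        else st2)
      st

def get_highest_education_level (education_list : List (List (String × String))) : String :=
  if education_list = [] then "Not available"
  else (education_list.foldl pvStepA (0, "Not available")).2

-- ===== PORT B =====
-- levels in descending-rank order: slug, keywords
def pvLevelsB : List (String × List String) :=
  [ ("phd", ["phd", "doctorate", "d.phil"]),
    ("master", ["master", "m.sc", "m.a.", "mba", "meng"]),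
    ("bachelor", ["bachelor", "b.sc", "b.a.", "beng", "llb", "bachelor of science"]),
    ("associate", ["associate", "diploma"]),
    ("high_school", ["high school", "a-level", "foundation"]) ]

-- 'if text and any(kw in text for kw in keywords)'
def pvMatchB (kws : List String) (edu_item : List (String × String)) : Bool :=
  let text := PySem.Str.lower (pyDictGetD edu_item "degree" "")
  (!(text = "")) && kws.any (fun kw => PySem.Str.isIn kw text)

-- outer loop over levels; inner 'for edu_item … return slug' is an early-exit scan = List.any
def pvGoB (levels : List (String × List String)) (education_list : List (List (String × String))) : String :=
  match levels with
  | [] => "Not available"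
  | (slug, kws) :: rest =>
      if education_list.any (pvMatchB kws) then slug else pvGoB rest education_list

def get_highest_education_level_alt (education_list : List (List (String × String))) : String :=
  pvGoB pvLevelsB education_list

-- ===== PRECONDITION & SPEC =====
def Spec_get_highest_education_level (education_list : List (List (String × String))) (out : String) : Prop := out = get_highest_education_level_alt education_list
instance (education_list : List (List (String × String))) (out : String) : Decidable (Spec_get_highest_education_level education_list out) := by unfold Spec_get_highest_education_level; infer_instance

-- ===== CLAIM (what is proved, stated in full; the proofs are below) =====
def Claim_equal_get_highest_education_level : Prop := ∀ (education_list : List (List (String × String))), Dom_get_highest_education_level education_list → Spec_get_highest_education_level education_list (get_highest_education_level education_list)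

-- ===== LEMMAS AND PROOFS =====

-- keyword lists, by rank
def pvK (i : Int) : List String :=
  if i = 5 then ["phd", "doctorate", "d.phil"]
  else if i = 4 then ["master", "m.sc", "m.a.", "mba", "meng"]
  else if i = 3 then ["bachelor", "b.sc", "b.a.", "beng", "llb", "bachelor of science"]
  else if i = 2 then ["associate", "diploma"]
  else ["high school", "a-level", "foundation"]

-- highest rank matched by one item (0 = none)
def pvIRank (edu_item : List (String × String)) : Int :=
  if pvMatchB (pvK 5) edu_item then 5
  else if pvMatchB (pvK 4) edu_item then 4
  else if pvMatchB (pvK 3) edu_item then 3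
  else if pvMatchB (pvK 2) edu_item then 2
  else if pvMatchB (pvK 1) edu_item then 1
  else 0

def pvMRank (l : List (List (String × String))) : Int :=
  l.foldr (fun it acc => max (pvIRank it) acc) 0

def pvSlugOf (r : Int) : String :=
  if r = 5 then "phd" else if r = 4 then "master" else if r = 3 then "bachelor"
  else if r = 2 then "associate" else if r = 1 then "high_school" else "Not available"

theorem pvIRank_nonneg (it : List (String × String)) : 0 ≤ pvIRank it := by
  unfold pvIRank; split_ifs <;> norm_num

theorem pvIRank_le (it : List (String × String)) : pvIRank it ≤ 5 := by
  unfold pvIRank; split_ifs <;> norm_num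

theorem pvMRank_nonneg (l : List (List (String × String))) : 0 ≤ pvMRank l := by
  induction l with
  | nil => simp [pvMRank]
  | cons it l ih => simp only [pvMRank, List.foldr] at *; omega

theorem pvMRank_le (l : List (List (String × String))) : pvMRank l ≤ 5 := by
  induction l with
  | nil => simp [pvMRank]
  | cons it l ih =>
      have := pvIRank_le it
      simp only [pvMRank, List.foldr] at *; omega

theorem pvMRank_cons (it : List (String × String)) (l : List (List (String × String))) :
    pvMRank (it :: l) = max (pvIRank it) (pvMRank l) := rfl

-- one item of A's outer loop, characterized
theorem pvStepA_eq (r : Int) (s : String) (it : List (String × String)) (hr : 0 ≤ r) :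
    pvStepA (r, s) it =
      if pvIRank it > r then (pvIRank it, pvSlugOf (pvIRank it)) else (r, s) := by
  show (if PySem.Str.lower (pyDictGetD it "degree" "") = "" then _ else _) = _
  by_cases hd : PySem.Str.lower (pyDictGetD it "degree" "") = ""
  · have h0 : pvIRank it = 0 := by
      unfold pvIRank pvMatchB
      simp [hd]
    rw [if_pos hd, h0]
    rw [if_neg (by omega)]
  · rw [if_neg hd]
    have hm : ∀ i : Int, pvMatchB (pvK i) it =
        (pvK i).any (fun kw => PySem.Str.isIn kw (PySem.Str.lower (pyDictGetD it "degree" ""))) := by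
      intro i; unfold pvMatchB; simp [hd]
    unfold pvHierA
    simp only [List.foldl]
    rw [show (["phd", "doctorate", "d.phil"] : List String) = pvK 5 from rfl,
        show (["master", "m.sc", "m.a.", "mba", "meng"] : List String) = pvK 4 from rfl,
        show (["bachelor", "b.sc", "b.a.", "beng", "llb", "bachelor of science"] : List String) = pvK 3 from rfl,
        show (["associate", "diploma"] : List String) = pvK 2 from rfl,
        show (["high school", "a-level", "foundation"] : List String) = pvK 1 from rfl]
    rw [← hm 5, ← hm 4, ← hm 3, ← hm 2, ← hm 1]
    clear hm hd
    unfold pvIRank pvSlugOf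
    cases h5 : pvMatchB (pvK 5) it <;> cases h4 : pvMatchB (pvK 4) it <;>
      cases h3 : pvMatchB (pvK 3) it <;> cases h2 : pvMatchB (pvK 2) it <;>
      cases h1 : pvMatchB (pvK 1) it <;>
      simp only [h5, h4, h3, h2, h1, Bool.false_eq_true, Bool.true_eq_false,
        if_true, if_false, ite_true, ite_false, ite_self] <;>
      split_ifs <;> (try dsimp only at *) <;> first | rfl | omega

theorem pvFoldA_eq (l : List (List (String × String))) :
    ∀ r : Int, 0 ≤ r →
      l.foldl pvStepA (r, pvSlugOf r) =
        (max r (pvMRank l), pvSlugOf (max r (pvMRank l))) := by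
  induction l with
  | nil =>
      intro r hr
      have h0 : pvMRank ([] : List (List (String × String))) = 0 := rfl
      simp [h0, max_eq_left hr]
  | cons it l ih =>
      intro r hr
      have hb := pvIRank_nonneg it
      have hml := pvMRank_nonneg l
      rw [List.foldl_cons, pvStepA_eq r _ it hr]
      by_cases h : pvIRank it > r
      · rw [if_pos h, ih (pvIRank it) hb, pvMRank_cons]
        have : max (pvIRank it) (pvMRank l) = max r (max (pvIRank it) (pvMRank l)) := by omega
        rw [← this]
      · rw [if_neg h, ih r hr, pvMRank_cons]
        have : max r (pvMRank l) = max r (max (pvIRank it) (pvMRank l)) := by omega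
        rw [← this]

theorem pvA_eq (l : List (List (String × String))) :
    get_highest_education_level l = pvSlugOf (pvMRank l) := by
  unfold get_highest_education_level
  by_cases h : l = []
  · subst h; rfl
  · rw [if_neg h]
    have h0 : pvSlugOf 0 = "Not available" := rfl
    rw [← h0, pvFoldA_eq l 0 le_rfl]
    have := pvMRank_nonneg l
    rw [max_eq_right this]

-- item membership bounds the list rank
theorem pvIRank_le_mrank (l : List (List (String × String))) (it : List (String × String))
    (h : it ∈ l) : pvIRank it ≤ pvMRank l := by
  induction l with
  | nil => cases h
  | cons x l ih =>
      rw [pvMRank_cons]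
      rcases List.mem_cons.1 h with h | h
      · subst h; omega
      · have := ih h; omega

theorem pvMatch_irank_ge (i : Int) (hi : 1 ≤ i) (hi5 : i ≤ 5) (it : List (String × String))
    (h : pvMatchB (pvK i) it = true) : i ≤ pvIRank it := by
  unfold pvIRank
  interval_cases i <;> split_ifs <;> simp_all

theorem pvIRank_eq_match (i : Int) (hi : 1 ≤ i) (hi5 : i ≤ 5) (it : List (String × String))
    (h : pvIRank it = i) : pvMatchB (pvK i) it = true := by
  unfold pvIRank at h
  interval_cases i <;> split_ifs at h <;> simp_all <;> omega

theorem pvAny_imp_mrank (l : List (List (String × String))) (i : Int) (hi : 1 ≤ i) (hi5 : i ≤ 5)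
    (h : l.any (pvMatchB (pvK i)) = true) : i ≤ pvMRank l := by
  rcases List.any_eq_true.1 h with ⟨it, hmem, hm⟩
  have := pvMatch_irank_ge i hi hi5 it hm
  have := pvIRank_le_mrank l it hmem
  omega

theorem pvMRank_attained (l : List (List (String × String))) (h : 1 ≤ pvMRank l) :
    ∃ it ∈ l, pvIRank it = pvMRank l := by
  induction l with
  | nil => simp [pvMRank] at h
  | cons it l ih =>
      rw [pvMRank_cons] at h ⊢
      by_cases hc : pvMRank l ≤ pvIRank it
      · exact ⟨it, List.mem_cons_self, (max_eq_left hc).symm⟩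
      · have h1 : max (pvIRank it) (pvMRank l) = pvMRank l := by omega
        rw [h1] at h ⊢
        rcases ih h with ⟨x, hx, hr⟩
        exact ⟨x, List.mem_cons_of_mem _ hx, hr⟩

theorem pvMrank_any (l : List (List (String × String))) (i : Int) (hi : 1 ≤ i) (hi5 : i ≤ 5)
    (h : pvMRank l = i) : l.any (pvMatchB (pvK i)) = true := by
  rcases pvMRank_attained l (by omega) with ⟨it, hmem, hr⟩
  exact List.any_eq_true.2 ⟨it, hmem, pvIRank_eq_match i hi hi5 it (by omega)⟩

theorem pvAny_false (l : List (List (String × String))) (i : Int) (hi : 1 ≤ i) (hi5 : i ≤ 5)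
    (h : pvMRank l < i) : l.any (pvMatchB (pvK i)) = false := by
  cases hc : l.any (pvMatchB (pvK i)) with
  | false => rfl
  | true => have := pvAny_imp_mrank l i hi hi5 hc; omega

theorem pvB_eq (l : List (List (String × String))) :
    get_highest_education_level_alt l = pvSlugOf (pvMRank l) := by
  have hB : get_highest_education_level_alt l =
      (if l.any (pvMatchB (pvK 5)) then "phd"
       else if l.any (pvMatchB (pvK 4)) then "master"
       else if l.any (pvMatchB (pvK 3)) then "bachelor"
       else if l.any (pvMatchB (pvK 2)) then "associate"
       else if l.any (pvMatchB (pvK 1)) then "high_school"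
       else "Not available") := rfl
  rw [hB]
  have h0 := pvMRank_nonneg l
  have h5 := pvMRank_le l
  unfold pvSlugOf
  interval_cases h : pvMRank l
  · rw [if_neg (by simp [pvAny_false l 5 (by norm_num) (by norm_num) (by omega)]),
        if_neg (by simp [pvAny_false l 4 (by norm_num) (by norm_num) (by omega)]),
        if_neg (by simp [pvAny_false l 3 (by norm_num) (by norm_num) (by omega)]),
        if_neg (by simp [pvAny_false l 2 (by norm_num) (by norm_num) (by omega)]),
        if_neg (by simp [pvAny_false l 1 (by norm_num) (by norm_num) (by omega)])]
    norm_num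
  · rw [if_neg (by simp [pvAny_false l 5 (by norm_num) (by norm_num) (by omega)]),
        if_neg (by simp [pvAny_false l 4 (by norm_num) (by norm_num) (by omega)]),
        if_neg (by simp [pvAny_false l 3 (by norm_num) (by norm_num) (by omega)]),
        if_neg (by simp [pvAny_false l 2 (by norm_num) (by norm_num) (by omega)]),
        if_pos (by simp [pvMrank_any l 1 (by norm_num) (by norm_num) h])]
    norm_num
  · rw [if_neg (by simp [pvAny_false l 5 (by norm_num) (by norm_num) (by omega)]),
        if_neg (by simp [pvAny_false l 4 (by norm_num) (by norm_num) (by omega)]),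
        if_neg (by simp [pvAny_false l 3 (by norm_num) (by norm_num) (by omega)]),
        if_pos (by simp [pvMrank_any l 2 (by norm_num) (by norm_num) h])]
    norm_num
  · rw [if_neg (by simp [pvAny_false l 5 (by norm_num) (by norm_num) (by omega)]),
        if_neg (by simp [pvAny_false l 4 (by norm_num) (by norm_num) (by omega)]),
        if_pos (by simp [pvMrank_any l 3 (by norm_num) (by norm_num) h])]
    norm_num
  · rw [if_neg (by simp [pvAny_false l 5 (by norm_num) (by norm_num) (by omega)]),
        if_pos (by simp [pvMrank_any l 4 (by norm_num) (by norm_num) h])]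
    norm_num
  · rw [if_pos (by simp [pvMrank_any l 5 (by norm_num) (by norm_num) h])]
    norm_num

-- ===== VERDICT (by name: the statement is the Claim_ definition above) =====
theorem get_highest_education_level_spec : Claim_equal_get_highest_education_level := by
  intro l _
  unfold Spec_get_highest_education_level
  rw [pvA_eq, pvB_eq]
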